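-- pv_equiv track=rewrite | github.com/cihan063/pascalize-depascalize | module.py | depascalize
-- ===== SOURCE A (Python) =====
-- def depascalize(text):
--     """
--     This function converts pascalized text format to depascalized text format.
--
--     Args:
--         text : the sentence which will depascalize.
--
--     Returns:
--         string type of tmp_str(list type). This string returns us that depascalized text.
--     """
--     list_str = list(text)
--     tmp_str = []
--     for count, value in enumerate(list_str):
--         if value.isupper() == True:
--             if count == 0 :
--                 tmp_str.append(value.lower())
--             else:
--                 tmp_str.append("_")
--                 tmp_str.append(value.lower())
--
--         else:
--             tmp_str.append(value)
--     return ''.join(str(e) for e in tmp_str)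
-- ===== SOURCE B (Python) =====
-- def depascalize(text):
--     """Recursive re-implementation: find the next internal uppercase boundary,
--     emit the first segment (its leading char lowered if uppercase), then
--     recurse on the remainder with a '_' separator."""
--     if not text:
--         return ''
--     j = next((i for i in range(1, len(text)) if text[i].isupper()), len(text))
--     head = (text[0].lower() if text[0].isupper() else text[0]) + text[1:j]
--     if j == len(text):
--         return head
--     return head + '_' + depascalize(text[j:])
-- ===== Notes on version B (the rewrite author's own statement) =====
-- stated objective: alternative
-- what changed: Replaced the single enumerate-and-append loop over characters with a recursive segmentation: find the next internal uppercase boundary, emit the lowered first segment, and recurse on the rest joined by an underscore separator.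
import Mathlib
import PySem

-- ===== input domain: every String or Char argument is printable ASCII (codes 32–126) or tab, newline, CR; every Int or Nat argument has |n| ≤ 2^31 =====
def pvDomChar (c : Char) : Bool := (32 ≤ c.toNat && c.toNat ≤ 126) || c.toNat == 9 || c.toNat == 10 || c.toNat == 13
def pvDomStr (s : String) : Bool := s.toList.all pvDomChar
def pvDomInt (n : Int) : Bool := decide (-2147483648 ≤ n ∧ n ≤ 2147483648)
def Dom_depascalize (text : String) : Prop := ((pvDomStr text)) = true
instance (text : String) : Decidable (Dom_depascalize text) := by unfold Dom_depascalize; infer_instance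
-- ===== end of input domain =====

-- B is an alternative decomposition (recursive segmentation at uppercase boundaries)
-- of A's single enumerate loop; same cost, proved to return the same string.

-- ===== PORT A =====
-- A: enumerate loop appending per character into tmp_str, then ''.join.
def depascalize (text : String) : String :=
  let listStr := text.toList
  let tmpStr : List Char :=
    (PySem.List.enumerate listStr).foldl
      (fun acc cv =>
        if PySem.Chars.isupper cv.2 = true then
          if cv.1 = 0 then acc ++ [PySem.Chars.lowerChar cv.2]
          else acc ++ ['_', PySem.Chars.lowerChar cv.2]
        else acc ++ [cv.2]) []
  String.mk (PySem.Chars.join [] (tmpStr.map (fun e => [e])))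

-- ===== PORT B =====
-- B: split off the first segment (up to the next internal uppercase char,
-- found by the scan `next(...)` ported as takeWhile/dropWhile), lower its
-- leading char if uppercase, recurse on the rest with a '_' separator.
def depascalizeAltCore : List Char → List Char
  | [] => []
  | c :: rest =>
    let pre := rest.takeWhile (fun d => !(PySem.Chars.isupper d))
    let suf := rest.dropWhile (fun d => !(PySem.Chars.isupper d))
    let head := (if PySem.Chars.isupper c then PySem.Chars.lowerChar c else c) :: pre
    if suf = [] then head else head ++ '_' :: depascalizeAltCore suf
termination_by cs => cs.length
decreasing_by
  simp only [List.length_cons]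
  have := List.length_dropWhile_le (fun d => !(PySem.Chars.isupper d)) rest
  omega

def depascalize_alt (text : String) : String :=
  String.mk (depascalizeAltCore text.toList)

-- ===== PRECONDITION & SPEC =====
def Spec_depascalize (text : String) (out : String) : Prop := out = depascalize_alt text
instance (text : String) (out : String) : Decidable (Spec_depascalize text out) := by unfold Spec_depascalize; infer_instance

-- ===== CLAIM (what is proved, stated in full; the proofs are below) =====
def Claim_equal_depascalize : Prop := ∀ (text : String), Dom_depascalize text → Spec_depascalize text (depascalize text)

-- ===== LEMMAS AND PROOFS =====

-- per-character emission of A for every non-first character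
def pvEmit (c : Char) : List Char :=
  if PySem.Chars.isupper c then ['_', PySem.Chars.lowerChar c] else [c]

-- canonical form both ports are reduced to
def pvCanon : List Char → List Char
  | [] => []
  | c :: rest =>
      (if PySem.Chars.isupper c then [PySem.Chars.lowerChar c] else [c]) ++ rest.flatMap pvEmit

lemma fold_tail (cs : List Char) : ∀ (acc : List Char) (i : Int), 1 ≤ i →
    (PySem.List.enumerate cs i).foldl
      (fun acc cv =>
        if PySem.Chars.isupper cv.2 = true then
          if cv.1 = 0 then acc ++ [PySem.Chars.lowerChar cv.2]
          else acc ++ ['_', PySem.Chars.lowerChar cv.2]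
        else acc ++ [cv.2]) acc = acc ++ cs.flatMap pvEmit := by
  induction cs with
  | nil => intro acc i _; simp [PySem.List.enumerate_nil]
  | cons c rest ih =>
    intro acc i hi
    rw [PySem.List.enumerate_cons, List.foldl_cons]
    have hi0 : i ≠ 0 := by omega
    have hi1 : (1:Int) ≤ i + 1 := by omega
    by_cases hup : PySem.Chars.isupper c = true
    · simp only [hup, if_pos, if_neg hi0]
      rw [ih _ _ hi1]; simp [pvEmit, hup]
    · simp only [hup]
      rw [ih _ _ hi1]; simp [pvEmit, hup]

lemma A_eq_canon (cs : List Char) :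
    (PySem.List.enumerate cs 0).foldl
      (fun acc cv =>
        if PySem.Chars.isupper cv.2 = true then
          if cv.1 = 0 then acc ++ [PySem.Chars.lowerChar cv.2]
          else acc ++ ['_', PySem.Chars.lowerChar cv.2]
        else acc ++ [cv.2]) [] = pvCanon cs := by
  cases cs with
  | nil => simp [PySem.List.enumerate_nil, pvCanon]
  | cons c rest =>
    rw [PySem.List.enumerate_cons, List.foldl_cons]
    by_cases hup : PySem.Chars.isupper c = true
    · simp only [hup, if_pos]
      rw [show (0:Int)+1 = 1 from rfl, fold_tail rest _ 1 (by omega)]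
      simp [pvCanon, hup]
    · simp only [hup]
      rw [show (0:Int)+1 = 1 from rfl, fold_tail rest _ 1 (by omega)]
      simp [pvCanon, hup]
lemma flatMap_no_upper (l : List Char) (h : ∀ d ∈ l, PySem.Chars.isupper d = false) :
    l.flatMap pvEmit = l := by
  induction l with
  | nil => rfl
  | cons x xs ih =>
    have hx := h x (List.mem_cons_self ..)
    have ih' := ih (fun d hd => h d (List.mem_cons_of_mem _ hd))
    simp [pvEmit, hx, ih']

lemma pvCanon_cons (c : Char) (rest : List Char) :
    pvCanon (c :: rest)
      = (if PySem.Chars.isupper c then [PySem.Chars.lowerChar c] else [c])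
        ++ rest.flatMap pvEmit := rfl

lemma B_aux : ∀ (n : Nat) (cs : List Char), cs.length ≤ n →
    depascalizeAltCore cs = pvCanon cs := by
  intro n
  induction n with
  | zero =>
    intro cs h
    have : cs = [] := by cases cs <;> simp_all
    subst this
    simp [depascalizeAltCore, pvCanon]
  | succ n ih =>
    intro cs h
    match cs with
    | [] => simp [depascalizeAltCore, pvCanon]
    | c :: rest =>
      rw [depascalizeAltCore]
      have hsplit := List.takeWhile_append_dropWhile
        (p := fun d => !(PySem.Chars.isupper d)) (l := rest)
      have htake : (rest.takeWhile (fun d => !(PySem.Chars.isupper d))).flatMap pvEmit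
          = rest.takeWhile (fun d => !(PySem.Chars.isupper d)) := by
        refine flatMap_no_upper _ (fun d hd => ?_)
        have := List.mem_takeWhile_imp hd
        simpa using this
      have hhd : (if PySem.Chars.isupper c then [PySem.Chars.lowerChar c] else [c])
          = [if PySem.Chars.isupper c then PySem.Chars.lowerChar c else c] := by
        by_cases hc : PySem.Chars.isupper c <;> simp [hc]
      cases hdw : rest.dropWhile (fun d => !(PySem.Chars.isupper d)) with
      | nil =>
        simp only [if_pos]
        rw [pvCanon_cons, hhd]
        conv_rhs => rw [← hsplit]
        simp [hdw, htake]
      | cons u r2 =>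
        have hne : rest.dropWhile (fun d => !(PySem.Chars.isupper d)) ≠ [] := by
          simp [hdw]
        have hu : PySem.Chars.isupper u = true := by
          have h0 := List.head_dropWhile_not (fun d => !(PySem.Chars.isupper d)) hne
          have h1 : (List.dropWhile (fun d => !(PySem.Chars.isupper d)) rest).head hne = u :=
            by simp [hdw]
          rw [h1] at h0
          simpa using h0
        have hlen : (u :: r2).length ≤ n := by
          have h1 := List.length_dropWhile_le (fun d => !(PySem.Chars.isupper d)) rest
          rw [hdw] at h1
          simp only [List.length_cons] at h h1 ⊢
          omega
        have hih := ih (u :: r2) hlen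
        simp only [if_neg (by simp : u :: r2 ≠ [])]
        rw [pvCanon_cons, hhd]
        conv_rhs => rw [← hsplit]
        rw [hdw, List.flatMap_append, htake, hih, pvCanon_cons]
        simp [pvEmit, hu]

lemma B_eq_canon (cs : List Char) : depascalizeAltCore cs = pvCanon cs :=
  B_aux cs.length cs le_rfl

-- ===== VERDICT (by name: the statement is the Claim_ definition above) =====
theorem depascalize_spec : Claim_equal_depascalize := by
  intro text _
  unfold Spec_depascalize depascalize depascalize_alt
  simp only []
  rw [A_eq_canon, B_eq_canon]
  rw [PySem.Chars.join_nil_singletons]
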